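-- pv_equiv track=rewrite | github.com/Aleksey6722/BusTimeBot | main.py | sum_duplicates
-- ===== SOURCE A (Python) =====
-- def sum_duplicates(sorted_list):
--     a_list = []
--     i = 0
--     for item in sorted_list:
--         if len(a_list) > 0 and item[0] == a_list[i - 1][0]:
--             a_list[i - 1][1] = a_list[i - 1][1] + '-' + item[1]
--             continue
--         a_list.append(item)
--         i += 1
--     return list(map(lambda x: ';'.join(x), a_list))
-- ===== SOURCE B (Python) =====
-- def sum_duplicates(sorted_list):
--     # Divide and conquer: solve each half, then merge the halves' edge runs
--     # when they share a key.  Unlike the original, the input's inner lists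
--     # are not mutated; the return value is the same.
--     if not sorted_list:
--         return []
--
--     def solve(lo, hi):
--         if hi - lo == 1:
--             return [list(sorted_list[lo])]
--         mid = (lo + hi) // 2
--         left = solve(lo, mid)
--         right = solve(mid, hi)
--         if left[-1][0] == right[0][0]:
--             j = left[-1]
--             j[1] = j[1] + '-' + right[0][1]
--             return left + right[1:]
--         return left + right
--
--     return [';'.join(x) for x in solve(0, len(sorted_list))]
-- ===== Notes on version B (the rewrite author's own statement) =====
-- stated objective: alternative
-- what changed: Replaced A's single forward pass, which merges runs by mutating the last kept entry's second field in place, with a divide-and-conquer: recursively solve each half and merge the halves' boundary runs when they share a key; B does not mutate the caller's inner lists (A does), the return value is the same.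
import Mathlib
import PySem

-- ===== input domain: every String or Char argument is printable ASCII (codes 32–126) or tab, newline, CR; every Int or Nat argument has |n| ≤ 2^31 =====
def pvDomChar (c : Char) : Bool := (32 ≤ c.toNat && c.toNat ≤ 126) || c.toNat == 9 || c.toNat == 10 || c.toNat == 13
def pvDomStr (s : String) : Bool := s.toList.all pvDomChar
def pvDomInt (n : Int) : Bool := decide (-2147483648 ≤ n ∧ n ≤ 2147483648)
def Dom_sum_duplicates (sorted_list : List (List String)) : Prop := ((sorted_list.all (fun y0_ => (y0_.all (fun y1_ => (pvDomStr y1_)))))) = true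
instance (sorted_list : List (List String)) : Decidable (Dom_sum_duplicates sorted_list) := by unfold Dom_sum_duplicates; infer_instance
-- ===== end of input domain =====

-- B replaces A's single forward pass (which merges by mutating the last kept entry's second
-- field in place) by a divide-and-conquer: solve each half recursively and merge the halves'
-- boundary runs when they share a key.  A mutates the caller's inner lists, B does not, so
-- only the RETURN value is proved equal.

-- ===== PORT A =====
-- one iteration of A's for-loop; state = (a_list, i).
-- pyGetD/pySetD are the total forms of item[0], a_list[i-1], a_list[i-1][1] = …:
-- exact under Pre_ (every index these lines touch is then in range).
def aStep (st : List (List String) × Int) (item : List String) : List (List String) × Int :=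
  if 0 < st.1.length ∧
      PySem.List.pyGetD item 0 "" = PySem.List.pyGetD (PySem.List.pyGetD st.1 (st.2 - 1) []) 0 "" then
    -- a_list[i-1][1] = a_list[i-1][1] + '-' + item[1]   (a_list[i-1] written out in place of Python's reference)
    (PySem.List.pySetD st.1 (st.2 - 1)
        (PySem.List.pySetD (PySem.List.pyGetD st.1 (st.2 - 1) []) 1
          (PySem.List.pyGetD (PySem.List.pyGetD st.1 (st.2 - 1) []) 1 ""
            ++ "-" ++ PySem.List.pyGetD item 1 "")), st.2)
  else
    (st.1 ++ [item], st.2 + 1)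

def sum_duplicates (sorted_list : List (List String)) : List String :=
  ((sorted_list.foldl aStep ([], 0)).1).map (fun x => PySem.Str.join ";" x)

-- ===== PORT B =====
-- x[0]; total form pyGetD, exact under Pre_ (every [0] B reads is then in range).
def keyOf (it : List String) : String := PySem.List.pyGetD it 0 ""

-- x[1]; total form, exact under Pre_.
def g1 (it : List String) : String := PySem.List.pyGetD it 1 ""

-- B's boundary update 'j[1] = j[1] + '-' + right[0][1]' applied to j (= left[-1])
def mrg (q y : List String) : List String :=
  PySem.List.pySetD q 1 (g1 q ++ "-" ++ g1 y)

-- the 'if left[-1][0] == right[0][0]: … return left + right[1:]  else return left + right'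
-- step of B; left[-1] written out as pyGetD L (-1) (Python mutates it in place).
def dcMerge (L R : List (List String)) : List (List String) :=
  if keyOf (PySem.List.pyGetD L (-1) []) = keyOf (PySem.List.pyGetD R 0 []) then
    L.dropLast ++ [mrg (PySem.List.pyGetD L (-1) []) (PySem.List.pyGetD R 0 [])] ++ R.drop 1
  else L ++ R

-- solve(lo, hi) of B, carried as the sublist it works on; (lo+hi)//2 - lo = (hi-lo)//2,
-- so the Python midpoint is length/2 here.
def dcSolve (l : List (List String)) : List (List String) :=
  if l.length ≤ 1 then l
  else dcMerge (dcSolve (l.take (l.length / 2))) (dcSolve (l.drop (l.length / 2)))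
termination_by l.length
decreasing_by
  · simp only [List.length_take]; omega
  · simp only [List.length_drop]; omega

def sum_duplicates_alt (sorted_list : List (List String)) : List String :=
  if sorted_list = [] then []
  else (dcSolve sorted_list).map (fun x => PySem.Str.join ";" x)

-- ===== PRECONDITION & SPEC =====
-- Pre_ excludes exactly the inputs on which A raises IndexError: an empty inner item in a list
-- of length ≥ 2 (A then reads its [0]), or two adjacent items with equal first element one of
-- which has fewer than 2 elements (the merge branch then reads index 1).
def Pre_sum_duplicates (sorted_list : List (List String)) : Prop :=
  (sorted_list.length ≤ 1 ∨ ∀ it ∈ sorted_list, it ≠ []) ∧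
    List.IsChain (fun a b => keyOf a = keyOf b → 2 ≤ a.length ∧ 2 ≤ b.length) sorted_list

instance (sorted_list : List (List String)) : Decidable (Pre_sum_duplicates sorted_list) := by
  unfold Pre_sum_duplicates; infer_instance

def pvWitness_sum_duplicates : List (List String) :=
  [["a", "10:00"], ["a", "11:30"], ["b", "9:15", "x"], ["c"]]

def Spec_sum_duplicates (sorted_list : List (List String)) (out : List String) : Prop := out = sum_duplicates_alt sorted_list
instance (sorted_list : List (List String)) (out : List String) : Decidable (Spec_sum_duplicates sorted_list out) := by unfold Spec_sum_duplicates; infer_instance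

-- ===== CLAIM (what is proved, stated in full; the proofs are below) =====
def Claim_equal_sum_duplicates : Prop := ∀ (sorted_list : List (List String)), Dom_sum_duplicates sorted_list → Pre_sum_duplicates sorted_list → Spec_sum_duplicates sorted_list (sum_duplicates sorted_list)

-- ===== LEMMAS AND PROOFS =====

-- canonical form both ports are reduced to: runs of consecutive equal keys …
def groupRuns : List (List String) → List (List (List String))
  | [] => []
  | x :: xs =>
      (x :: xs.takeWhile (fun y => keyOf y == keyOf x)) ::
        groupRuns (xs.dropWhile (fun y => keyOf y == keyOf x))
termination_by l => l.length
decreasing_by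
  simp only [List.length_cons]
  exact Nat.lt_succ_of_le (List.length_dropWhile_le _ _)

-- … each run collapsed to its first item with field 1 replaced by the '-'-join
def mergeGroup (g : List (List String)) : List String :=
  let first := g.headD []
  if 1 < g.length then
    PySem.List.pySetD first 1 (PySem.Str.join "-" (g.map g1))
  else first

theorem keyOf_mut (q y : List String) : keyOf (mrg q y) = keyOf q := by
  simp [keyOf, mrg, PySem.List.pySetD_of_nonneg, PySem.List.pyGetD_zero, List.getD]

theorem length_mut (q y : List String) : (mrg q y).length = q.length := by
  simp [mrg, PySem.List.length_pySetD]

theorem g1_mut (q y : List String) (h : 2 ≤ q.length) : g1 (mrg q y) = g1 q ++ "-" ++ g1 y := by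
  simp [g1, mrg, PySem.List.pySetD_of_nonneg, PySem.List.pyGetD_ofNat', List.getD]
  rw [List.getElem?_set_self (by omega)]
  simp

theorem aStep_merge (acc : List (List String)) (p y : List String)
    (hk : keyOf y = keyOf p) :
    aStep (acc ++ [p], (acc.length : Int) + 1) y = (acc ++ [mrg p y], (acc.length : Int) + 1) := by
  unfold aStep
  have h1 : ((acc.length : Int) + 1 - 1) = ((acc.length : Nat) : Int) := by omega
  have h2 : PySem.List.pyGetD (acc ++ [p]) ((acc.length : Nat) : Int) [] = p := by
    simp [PySem.List.pyGetD_natCast, List.getD]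
  have h3 : ∀ v, PySem.List.pySetD (acc ++ [p]) ((acc.length : Nat) : Int) v = acc ++ [v] := by
    intro v
    rw [PySem.List.pySetD_natCast, List.set_append_right _ _ (le_refl _)]
    simp
  rw [h1]
  simp only [h2]
  rw [if_pos ⟨by simp, hk⟩]
  rw [h3]
  rfl

theorem foldl_run (run : List (List String)) : ∀ (acc : List (List String)) (p : List String),
    (∀ y ∈ run, keyOf y = keyOf p) →
    List.foldl aStep (acc ++ [p], (acc.length : Int) + 1) run
      = (acc ++ [List.foldl mrg p run], (acc.length : Int) + 1) := by
  induction run with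
  | nil => intro acc p _; rfl
  | cons y run ih =>
    intro acc p hk
    rw [List.foldl_cons, aStep_merge acc p y (hk y List.mem_cons_self), List.foldl_cons]
    exact ih acc (mrg p y) (fun z hz => by
      rw [hk z (List.mem_cons_of_mem _ hz), ← keyOf_mut p y])

theorem keyOf_foldl_mut (run : List (List String)) : ∀ p, keyOf (List.foldl mrg p run) = keyOf p := by
  induction run with
  | nil => intro p; rfl
  | cons y run ih => intro p; rw [List.foldl_cons, ih, keyOf_mut]

theorem join_cons_cons_str (a b : String) (l : List String) :
    PySem.Str.join "-" ((a ++ "-" ++ b) :: l) = PySem.Str.join "-" (a :: b :: l) := by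
  cases l with
  | nil =>
    simp [PySem.Str.join, PySem.Chars.join_cons_cons, PySem.Chars.join_singleton]
  | cons c l =>
    simp [PySem.Str.join, PySem.Chars.join_cons_cons, List.append_assoc]

theorem foldl_mut_eq_set_join (run : List (List String)) : ∀ p, 2 ≤ p.length →
    List.foldl mrg p run
      = PySem.List.pySetD p 1 (PySem.Str.join "-" (g1 p :: run.map g1)) := by
  induction run with
  | nil =>
    intro p hp
    simp only [List.foldl_nil, List.map_nil]
    have h : PySem.Str.join "-" [g1 p] = g1 p := by
      simp [PySem.Str.join, PySem.Chars.join_singleton]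
    rw [h, PySem.List.pySetD_of_nonneg _ _ (by omega : (0 : Int) ≤ 1)]
    simp only [Int.toNat_one, g1, PySem.List.pyGetD_ofNat', List.getD]
    rw [List.getElem?_eq_getElem (by omega : 1 < p.length)]
    simp [List.set_getElem_self]
  | cons y run ih =>
    intro p hp
    rw [List.foldl_cons, ih (mrg p y) (by rw [length_mut]; exact hp)]
    rw [g1_mut p y hp, List.map_cons]
    rw [join_cons_cons_str]
    simp only [mrg, PySem.List.pySetD_of_nonneg _ _ (by omega : (0:Int) ≤ 1), List.set_set]

theorem mergeGroup_run (x : List String) (run : List (List String))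
    (hx : run ≠ [] → 2 ≤ x.length) :
    List.foldl mrg x run = mergeGroup (x :: run) := by
  cases run with
  | nil => rfl
  | cons y run =>
    rw [foldl_mut_eq_set_join _ x (hx (by simp))]
    simp only [mergeGroup, List.headD_cons, List.length_cons]
    rw [if_pos (by omega)]
    rfl

theorem aStep_new (acc : List (List String)) (x : List String)
    (hnew : ∀ p, acc.getLast? = some p → keyOf p ≠ keyOf x) :
    aStep (acc, (acc.length : Int)) x = (acc ++ [x], (acc.length : Int) + 1) := by
  unfold aStep
  cases acc with
  | nil => simp
  | cons a as =>
    rw [if_neg]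
    rintro ⟨-, hk⟩
    have h1 : (((a :: as).length : Int) - 1) = (((a :: as).length - 1 : Nat) : Int) := by
      simp
    rw [h1, PySem.List.pyGetD_natCast] at hk
    have h2 : (a :: as).getD ((a :: as).length - 1) [] = (a :: as).getLast (by simp) := by
      rw [List.getLast_eq_getElem, List.getD_eq_getElem _ _ (by simp)]
      congr 1
    rw [h2] at hk
    exact hnew _ (List.getLast?_eq_some_getLast (by simp)) hk.symm

theorem foldl_main (l : List (List String)) :
    (∀ it ∈ l, it ≠ []) →
    List.IsChain (fun a b => keyOf a = keyOf b → 2 ≤ a.length ∧ 2 ≤ b.length) l →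
    ∀ (acc : List (List String)),
    (∀ x, l.head? = some x → ∀ p, acc.getLast? = some p → keyOf p ≠ keyOf x) →
    (List.foldl aStep (acc, (acc.length : Int)) l).1 = acc ++ (groupRuns l).map mergeGroup := by
  induction l using groupRuns.induct with
  | case1 => intro _ _ acc _; simp [groupRuns]
  | case2 x xs ih =>
    intro hne hchain acc hnew
    have hq : ∀ y ∈ xs.takeWhile (fun y => keyOf y == keyOf x), keyOf y = keyOf x := by
      intro y hy
      simpa using List.mem_takeWhile_imp hy
    rw [List.foldl_cons, aStep_new acc x (fun p hp => hnew x rfl p hp)]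
    conv_lhs => rw [← List.takeWhile_append_dropWhile
      (p := fun y => keyOf y == keyOf x) (l := xs)]
    rw [List.foldl_append, foldl_run _ acc x hq]
    set m := List.foldl mrg x (xs.takeWhile (fun y => keyOf y == keyOf x)) with hm
    have hkm : keyOf m = keyOf x := keyOf_foldl_mut _ x
    have hlen2 : ((acc.length : Int) + 1) = (((acc ++ [m]).length : Nat) : Int) := by simp
    rw [hlen2, ih (fun it hit => hne it (List.mem_cons_of_mem _ ((List.dropWhile_sublist _).mem hit)))
      (hchain.suffix ((List.dropWhile_suffix _).trans (List.suffix_cons _ _)))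
      (acc ++ [m])
      (by
        intro z hz p hp
        have hpm : p = m := by
          rw [List.getLast?_concat] at hp
          exact (Option.some.injEq _ _).mp hp.symm
        have hzq : ¬ (keyOf z == keyOf x) = true := by
          have := List.head?_dropWhile_not (fun y => keyOf y == keyOf x) xs
          simp only [hz] at this
          simpa using this
        rw [hpm, hkm]
        intro hcon
        exact hzq (by simp [hcon]))]
    have hrun : mergeGroup (x :: xs.takeWhile (fun y => keyOf y == keyOf x)) = m := by
      rw [hm]
      refine (mergeGroup_run x _ (fun hne' => ?_)).symm
      obtain ⟨y, run', hy⟩ := List.exists_cons_of_ne_nil hne'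
      have hxmem : xs = (xs.takeWhile (fun y => keyOf y == keyOf x)) ++ xs.dropWhile (fun y => keyOf y == keyOf x) :=
        (List.takeWhile_append_dropWhile).symm
      have hchain2 : List.IsChain (fun a b => keyOf a = keyOf b → 2 ≤ a.length ∧ 2 ≤ b.length) (x :: y :: (run' ++ xs.dropWhile (fun y => keyOf y == keyOf x))) := by
        rw [hxmem, hy] at hchain
        simpa using hchain
      have hkx : keyOf y = keyOf x := hq y (by rw [hy]; exact List.mem_cons_self)
      exact ((List.isChain_cons_cons.mp hchain2).1 hkx.symm).1
    show _ = acc ++ List.map mergeGroup (groupRuns (x :: xs))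
    rw [groupRuns]
    simp [hrun]

-- ===== B-side lemmas =====

theorem keyOf_setD (q : List String) (v : String) :
    keyOf (PySem.List.pySetD q 1 v) = keyOf q := by
  simp [keyOf, PySem.List.pySetD_of_nonneg, PySem.List.pyGetD_zero, List.getD]

theorem g1_setD (q : List String) (v : String) (h : 2 ≤ q.length) :
    g1 (PySem.List.pySetD q 1 v) = v := by
  simp [g1, PySem.List.pySetD_of_nonneg, PySem.List.pyGetD_ofNat', List.getD]
  rw [List.getElem?_set_self (by omega)]
  simp

theorem keyOf_mergeGroup (x : List String) (t : List (List String)) :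
    keyOf (mergeGroup (x :: t)) = keyOf x := by
  unfold mergeGroup
  split
  · exact keyOf_setD _ _
  · rfl

theorem mergeGroup_singleton (x : List String) : mergeGroup [x] = x := by
  simp [mergeGroup]

theorem g1_mergeGroup (x : List String) (t : List (List String)) (hx : 2 ≤ x.length) :
    g1 (mergeGroup (x :: t)) = PySem.Str.join "-" ((x :: t).map g1) := by
  cases t with
  | nil =>
    rw [mergeGroup_singleton]
    simp [PySem.Str.join, PySem.Chars.join_singleton, List.map]
  | cons y t =>
    unfold mergeGroup
    rw [if_pos (by simp)]
    exact g1_setD _ _ hx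

theorem setD_mergeGroup (x : List String) (t : List (List String)) (v : String) :
    PySem.List.pySetD (mergeGroup (x :: t)) 1 v = PySem.List.pySetD x 1 v := by
  unfold mergeGroup
  split
  · simp only [List.headD_cons]
    rw [PySem.List.pySetD_of_nonneg _ _ (by omega : (0:Int) ≤ 1),
        PySem.List.pySetD_of_nonneg _ _ (by omega : (0:Int) ≤ 1),
        PySem.List.pySetD_of_nonneg _ _ (by omega : (0:Int) ≤ 1), List.set_set]
  · rfl

theorem str_join_cons_cons (a b : String) (l : List String) :
    PySem.Str.join "-" (a :: b :: l) = a ++ "-" ++ PySem.Str.join "-" (b :: l) := by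
  apply String.toList_injective
  cases l with
  | nil => simp [PySem.Str.join, PySem.Chars.join_cons_cons, PySem.Chars.join_singleton]
  | cons c l => simp [PySem.Str.join, PySem.Chars.join_cons_cons, List.append_assoc]

theorem str_join_append (xs : List String) : ∀ (a : String) (ys : List String), ys ≠ [] →
    PySem.Str.join "-" ((a :: xs) ++ ys)
      = PySem.Str.join "-" (a :: xs) ++ "-" ++ PySem.Str.join "-" ys := by
  induction xs with
  | nil =>
    intro a ys hy
    obtain ⟨b, t, rfl⟩ := List.exists_cons_of_ne_nil hy
    rw [List.singleton_append, str_join_cons_cons]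
    simp [PySem.Str.join, PySem.Chars.join_singleton]
  | cons x xs ih =>
    intro a ys hy
    rw [List.cons_append, List.cons_append, str_join_cons_cons, ← List.cons_append,
        ih x ys hy, str_join_cons_cons]
    simp [String.append_assoc]

theorem mergeGroup_append (x y : List String) (t1 t2 : List (List String))
    (hx : 2 ≤ x.length) (hy : 2 ≤ y.length) :
    mrg (mergeGroup (x :: t1)) (mergeGroup (y :: t2)) = mergeGroup ((x :: t1) ++ (y :: t2)) := by
  have hj : PySem.Str.join "-" (((x :: t1) ++ (y :: t2)).map g1)
      = PySem.Str.join "-" ((x :: t1).map g1) ++ "-" ++ PySem.Str.join "-" ((y :: t2).map g1) := by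
    rw [List.map_append, List.map_cons]
    exact str_join_append (t1.map g1) (g1 x) ((y :: t2).map g1) (by simp)
  unfold mrg
  rw [setD_mergeGroup, g1_mergeGroup x t1 hx, g1_mergeGroup y t2 hy]
  unfold mergeGroup
  rw [if_pos (by simp)]
  simp only [List.cons_append, List.headD_cons]
  rw [← List.cons_append, hj]

theorem dcMerge_cons (a : List String) (A' B : List (List String)) (h : A' ≠ []) :
    dcMerge (a :: A') B = a :: dcMerge A' B := by
  unfold dcMerge
  have hg : PySem.List.pyGetD (a :: A') (-1) [] = PySem.List.pyGetD A' (-1) [] := by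
    rw [PySem.List.pyGetD_neg_one (a :: A') [] (by simp), PySem.List.pyGetD_neg_one A' [] h]
    exact List.getLast_cons h
  rw [hg, List.dropLast_cons_of_ne_nil h]
  split
  · simp
  · simp

theorem groupRuns_ne_nil (l : List (List String)) (h : l ≠ []) : groupRuns l ≠ [] := by
  obtain ⟨x, xs, rfl⟩ := List.exists_cons_of_ne_nil h
  rw [groupRuns]
  simp

-- key of every member of the run of x is keyOf x, so the last element of a one-run list
-- shares x's key; used to read the chain hypothesis at the boundary
theorem key_of_mem_run (x y : List String) (xs : List (List String))
    (hall : xs.takeWhile (fun y => keyOf y == keyOf x) = xs) (hy : y ∈ x :: xs) :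
    keyOf y = keyOf x := by
  rcases List.mem_cons.mp hy with rfl | hy
  · rfl
  · have := List.mem_takeWhile_imp (l := xs) (p := fun y => keyOf y == keyOf x) (by rw [hall]; exact hy)
    simpa using this

theorem dcMerge_C (l2 : List (List String)) : ∀ (l1 : List (List String)), l1 ≠ [] → l2 ≠ [] →
    List.IsChain (fun a b => keyOf a = keyOf b → 2 ≤ a.length ∧ 2 ≤ b.length) (l1 ++ l2) →
    dcMerge ((groupRuns l1).map mergeGroup) ((groupRuns l2).map mergeGroup)
      = (groupRuns (l1 ++ l2)).map mergeGroup := by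
  intro l1
  induction l1 using groupRuns.induct with
  | case1 => intro h; exact absurd rfl h
  | case2 x xs ih =>
    intro _ h2 hchain
    by_cases hd : xs.dropWhile (fun y => keyOf y == keyOf x) = []
    · -- l1 is a single run: xs = takeWhile …
      have hall : xs.takeWhile (fun y => keyOf y == keyOf x) = xs := by
        have := List.takeWhile_append_dropWhile (p := fun y => keyOf y == keyOf x) (l := xs)
        rw [hd, List.append_nil] at this
        exact this
      obtain ⟨y, ys, rfl⟩ := List.exists_cons_of_ne_nil h2
      have hruns1 : groupRuns (x :: xs) = [x :: xs] := by
        rw [groupRuns, hall, hd, groupRuns]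
      have htw : (xs ++ y :: ys).takeWhile (fun z => keyOf z == keyOf x)
          = xs ++ (y :: ys).takeWhile (fun z => keyOf z == keyOf x) := by
        rw [List.takeWhile_append, if_pos (by rw [hall])]
      have hdw : (xs ++ y :: ys).dropWhile (fun z => keyOf z == keyOf x)
          = (y :: ys).dropWhile (fun z => keyOf z == keyOf x) := by
        rw [List.dropWhile_append, if_pos (by rw [hd]; rfl)]
      -- boundary chain pair: getLast (x :: xs) and y
      have hlastmem : (x :: xs).getLast (by simp) ∈ x :: xs := List.getLast_mem _
      have hlastkey : keyOf ((x :: xs).getLast (by simp)) = keyOf x :=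
        key_of_mem_run x _ xs hall hlastmem
      have hbound : keyOf y = keyOf x →
          2 ≤ ((x :: xs).getLast (by simp)).length ∧ 2 ≤ y.length := by
        intro hk
        obtain ⟨-, -, h3⟩ := List.isChain_append.mp hchain
        exact h3 _ (by rw [List.getLast?_eq_some_getLast (by simp)]; exact Option.mem_some_iff.mpr rfl)
          y (Option.mem_some_iff.mpr rfl) (by rw [hlastkey, hk])
      by_cases hkey : keyOf y = keyOf x
      · -- the boundary runs merge
        have hyx : (fun z => keyOf z == keyOf y) = (fun z => keyOf z == keyOf x) := by
          funext z; rw [hkey]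
        have hx2 : 2 ≤ x.length := by
          cases xs with
          | nil =>
            have := hbound hkey
            simpa using this.1
          | cons z zs =>
            have hkz : keyOf z = keyOf x :=
              key_of_mem_run x z (z :: zs) hall (by simp)
            have hch : List.IsChain (fun a b => keyOf a = keyOf b → 2 ≤ a.length ∧ 2 ≤ b.length) (x :: z :: (zs ++ y :: ys)) := by
              simpa using hchain
            exact ((List.isChain_cons_cons.mp hch).1 hkz.symm).1
        have hy2 : 2 ≤ y.length := (hbound hkey).2
        have hruns12 : groupRuns ((x :: xs) ++ y :: ys)
            = ((x :: xs) ++ (y :: ys.takeWhile (fun z => keyOf z == keyOf y)))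
              :: groupRuns (ys.dropWhile (fun z => keyOf z == keyOf y)) := by
          rw [List.cons_append, groupRuns, htw]
          rw [List.takeWhile_cons, if_pos (by simp [hkey]), hdw, List.dropWhile_cons,
              if_pos (by simp [hkey]), hyx]
          simp
        have hruns2 : groupRuns (y :: ys)
            = (y :: ys.takeWhile (fun z => keyOf z == keyOf y))
              :: groupRuns (ys.dropWhile (fun z => keyOf z == keyOf y)) := by
          rw [groupRuns]
        rw [hruns1, hruns12, hruns2]
        unfold dcMerge
        simp only [List.map_cons, List.map_nil]
        rw [if_pos (by
          rw [PySem.List.pyGetD_neg_one [mergeGroup (x :: xs)] [] (by simp)]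
          simp only [List.getLast_singleton, PySem.List.pyGetD_zero_cons]
          rw [keyOf_mergeGroup, keyOf_mergeGroup, hkey])]
        rw [PySem.List.pyGetD_neg_one [mergeGroup (x :: xs)] [] (by simp)]
        simp only [List.getLast_singleton, PySem.List.pyGetD_zero_cons, List.dropLast_singleton,
          List.drop_succ_cons, List.drop_zero, List.nil_append]
        rw [List.cons_append] at hruns12 ⊢
        have := mergeGroup_append x y xs (ys.takeWhile (fun z => keyOf z == keyOf y)) hx2 hy2
        rw [this]
        simp
      · -- distinct boundary keys: runs concatenate
        have hruns12 : groupRuns ((x :: xs) ++ y :: ys) = (x :: xs) :: groupRuns (y :: ys) := by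
          rw [List.cons_append, groupRuns, htw]
          rw [List.takeWhile_cons, if_neg (by simpa using hkey), hdw, List.dropWhile_cons,
              if_neg (by simpa using hkey)]
          simp
        rw [hruns1, hruns12]
        unfold dcMerge
        rw [if_neg (by
          simp only [List.map_cons, List.map_nil]
          rw [PySem.List.pyGetD_neg_one [mergeGroup (x :: xs)] [] (by simp)]
          simp only [List.getLast_singleton]
          obtain ⟨r, rs, hr⟩ := List.exists_cons_of_ne_nil (groupRuns_ne_nil (y :: ys) (by simp))
          have hrhead : ∃ t, r = y :: t := by
            rw [groupRuns] at hr
            exact ⟨_, (List.cons.injEq _ _ _ _).mp hr |>.1.symm⟩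
          obtain ⟨t, rfl⟩ := hrhead
          rw [hr]
          simp only [List.map_cons, PySem.List.pyGetD_zero_cons]
          rw [keyOf_mergeGroup, keyOf_mergeGroup]
          exact fun hc => hkey hc.symm)]
        simp
    · -- l1 has several runs: peel its first run
      set p := fun y => keyOf y == keyOf x with hp
      have htw : (xs ++ l2).takeWhile p = xs.takeWhile p := by
        rw [List.takeWhile_append]
        rw [if_neg (by
          intro hlen
          exact hd (by
            have heq : xs.takeWhile p = xs := (List.takeWhile_sublist p).eq_of_length hlen
            have h2 := List.takeWhile_append_dropWhile (p := p) (l := xs)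
            rw [heq] at h2
            exact List.append_cancel_left (h2.trans (List.append_nil xs).symm)))]
      have hdw : (xs ++ l2).dropWhile p = xs.dropWhile p ++ l2 := by
        rw [List.dropWhile_append, if_neg (by simpa [List.isEmpty_iff] using hd)]
      have hchain' : List.IsChain (fun a b => keyOf a = keyOf b → 2 ≤ a.length ∧ 2 ≤ b.length) (xs.dropWhile p ++ l2) := by
        refine hchain.suffix ?_
        obtain ⟨t, ht⟩ := List.dropWhile_suffix (l := xs) p
        refine List.IsSuffix.trans ⟨t, ?_⟩ (List.suffix_cons x (xs ++ l2))
        rw [← List.append_assoc, ht]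
      have hruns1 : groupRuns (x :: xs) = (x :: xs.takeWhile p) :: groupRuns (xs.dropWhile p) := by
        rw [groupRuns]
      have hruns12 : groupRuns ((x :: xs) ++ l2)
          = (x :: xs.takeWhile p) :: groupRuns (xs.dropWhile p ++ l2) := by
        rw [List.cons_append, groupRuns, htw, hdw]
      rw [hruns1, hruns12, List.map_cons, List.map_cons,
          dcMerge_cons _ _ _ (by
            intro hc
            exact groupRuns_ne_nil _ hd (List.map_eq_nil_iff.mp hc)),
          ih hd h2 hchain']

theorem dcSolve_eq_C (l : List (List String)) : l ≠ [] →
    List.IsChain (fun a b => keyOf a = keyOf b → 2 ≤ a.length ∧ 2 ≤ b.length) l →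
    dcSolve l = (groupRuns l).map mergeGroup := by
  induction l using dcSolve.induct with
  | case1 l hlen =>
    intro hne _
    match l, hlen, hne with
    | [x], _, _ =>
      rw [dcSolve]
      simp [groupRuns, mergeGroup_singleton]
  | case2 l hlen ih1 ih2 =>
    intro _ hchain
    have hn : 2 ≤ l.length := by omega
    have hm1 : 1 ≤ l.length / 2 := by omega
    have hm2 : l.length / 2 < l.length := by omega
    rw [dcSolve, if_neg hlen]
    rw [ih1 (by
          intro hc
          have := congrArg List.length hc
          simp only [List.length_take, List.length_nil] at this
          omega)
        (hchain.prefix (List.take_prefix _ _)),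
        ih2 (by
          intro hc
          have := congrArg List.length hc
          simp only [List.length_drop, List.length_nil] at this
          omega)
        (hchain.suffix (List.drop_suffix _ _))]
    rw [dcMerge_C (l.drop (l.length / 2)) (l.take (l.length / 2))
        (by intro hc; have := congrArg List.length hc; simp only [List.length_take, List.length_nil] at this; omega)
        (by intro hc; have := congrArg List.length hc; simp only [List.length_drop, List.length_nil] at this; omega)
        (by rw [List.take_append_drop]; exact hchain)]
    rw [List.take_append_drop]

-- ===== VERDICT (by name: the statement is the Claim_ definition above) =====
theorem sum_duplicates_spec : Claim_equal_sum_duplicates := by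
  intro l _ hpre
  unfold Spec_sum_duplicates
  match l with
  | [] => rfl
  | [x] =>
    unfold sum_duplicates sum_duplicates_alt
    rw [dcSolve]
    simp [aStep]
  | a :: b :: t =>
    have hne : ∀ it ∈ a :: b :: t, it ≠ [] := by
      rcases hpre.1 with h | h
      · simp at h
      · exact h
    unfold sum_duplicates sum_duplicates_alt
    rw [if_neg (by simp)]
    have hA := foldl_main (a :: b :: t) hne hpre.2 [] (by simp)
    simp only [List.length_nil, Nat.cast_zero, List.nil_append] at hA
    rw [hA, dcSolve_eq_C _ (by simp) hpre.2]
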